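-- pv_equiv track=rewrite | github.com/adhvaryu-athena/password-entropy-project | pwstrength/features/entropy.py | length_and_classes
-- ===== SOURCE A (Python) =====
-- from typing import Dict, Tuple
--
-- CHAR_CLASSES = {
--     "lower": str.islower,
--     "upper": str.isupper,
--     "digit": str.isdigit,
--     "space": str.isspace,
-- }
--
-- def length_and_classes(password: str) -> Tuple[int, int, Dict[str, bool]]:
--     """Return the length, number of active character classes, and flags."""
--     length = len(password or "")
--     flags = {name: False for name in CHAR_CLASSES}
--     flags["symbol"] = False
--
--     for char in password or "":
--         matched_class = False
--         for name, checker in CHAR_CLASSES.items():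
--             if checker(char):
--                 flags[name] = True
--                 matched_class = True
--                 break
--         if not matched_class:
--             flags["symbol"] = True
--
--     class_count = sum(1 for value in flags.values() if value)
--     return length, class_count, flags
-- ===== SOURCE B (Python) =====
-- def length_and_classes(password):
--     """Return the length, number of active character classes, and flags."""
--     s = password or ""
--     flags = {
--         "lower": any(c.islower() for c in s),
--         "upper": any(c.isupper() for c in s),
--         "digit": any(c.isdigit() for c in s),
--         "space": any(c.isspace() for c in s),
--         "symbol": any(
--             not (c.islower() or c.isupper() or c.isdigit() or c.isspace())
--             for c in s
--         ),
--     }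
--     return len(s), sum(flags.values()), flags
-- ===== Notes on version B (the rewrite author's own statement) =====
-- stated objective: idiomatic
-- what changed: Replaced the single character loop that mutates a flags dict with an inner break over CHAR_CLASSES by five independent any() membership scans (one per class, symbol = matches none) plus sum(flags.values()) for the count.
import Mathlib
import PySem

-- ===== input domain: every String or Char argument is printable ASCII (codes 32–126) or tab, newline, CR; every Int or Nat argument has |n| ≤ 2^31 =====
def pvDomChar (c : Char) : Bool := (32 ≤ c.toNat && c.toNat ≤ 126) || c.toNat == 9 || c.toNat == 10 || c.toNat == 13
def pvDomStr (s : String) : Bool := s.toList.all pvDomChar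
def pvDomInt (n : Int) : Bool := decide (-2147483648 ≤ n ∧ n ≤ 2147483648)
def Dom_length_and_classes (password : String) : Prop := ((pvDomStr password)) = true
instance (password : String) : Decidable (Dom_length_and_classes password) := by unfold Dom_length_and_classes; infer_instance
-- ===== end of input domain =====

-- B replaces A's one-pass loop over the password (dict mutation + inner break over the
-- class table) with one independent membership scan per character class; idiomatic, same cost.

-- ===== PORT A =====
-- 'password or ""' equals password for every string ('"" or ""' is ""), so it is ported as password itself.
def length_and_classes (password : String) : Int × Int × (List (String × Bool)) :=
  let length : Int := (PySem.Str.len password : Int)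
  let flags : PySem.Dict String Bool :=
    PySem.Dict.ofList [("lower", false), ("upper", false), ("digit", false), ("space", false)]
  let flags := flags.insert "symbol" false
  let flags := password.toList.foldl (fun fl c =>
      -- inner 'for name, checker in CHAR_CLASSES.items(): … break' = first matching class wins
      if PySem.Chars.islower c then fl.insert "lower" true
      else if PySem.Chars.isupper c then fl.insert "upper" true
      else if PySem.Chars.isdigit c then fl.insert "digit" true
      else if PySem.Chars.isspace c then fl.insert "space" true
      else fl.insert "symbol" true) flags
  let classCount : Int := flags.values.foldl (fun acc v => if v then acc + 1 else acc) 0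
  (length, classCount, flags.items)

-- ===== PORT B =====
def length_and_classes_alt (password : String) : Int × Int × (List (String × Bool)) :=
  let cs := password.toList
  let flags : List (String × Bool) :=
    [("lower", cs.any PySem.Chars.islower),
     ("upper", cs.any PySem.Chars.isupper),
     ("digit", cs.any PySem.Chars.isdigit),
     ("space", cs.any PySem.Chars.isspace),
     ("symbol", cs.any (fun c =>
        !(PySem.Chars.islower c || PySem.Chars.isupper c ||
          PySem.Chars.isdigit c || PySem.Chars.isspace c)))]
  ((cs.length : Int), (flags.map (fun p => if p.2 then (1 : Int) else 0)).sum, flags)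

-- ===== PRECONDITION & SPEC =====
def Spec_length_and_classes (password : String) (out : Int × Int × (List (String × Bool))) : Prop := out = length_and_classes_alt password
instance (password : String) (out : Int × Int × (List (String × Bool))) : Decidable (Spec_length_and_classes password out) := by unfold Spec_length_and_classes; infer_instance

-- ===== CLAIM (what is proved, stated in full; the proofs are below) =====
def Claim_equal_length_and_classes : Prop := ∀ (password : String), Dom_length_and_classes password → Spec_length_and_classes password (length_and_classes password)

-- ===== LEMMAS AND PROOFS =====

-- the Python character classes are pairwise disjoint (plain ASCII range facts), so A's
-- first-match break-chain flag for each class is just 'some char is in the class'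
theorem pv_lower_only (c : Char) (h : PySem.Chars.islower c = true) :
    PySem.Chars.isupper c = false ∧ PySem.Chars.isdigit c = false ∧
    PySem.Chars.isspace c = false := by
  have e1 : 'a'.val.toNat = 97 := rfl
  have e2 : 'z'.val.toNat = 122 := rfl
  have e3 : 'A'.val.toNat = 65 := rfl
  have e4 : 'Z'.val.toNat = 90 := rfl
  have e5 : '0'.val.toNat = 48 := rfl
  have e6 : '9'.val.toNat = 57 := rfl
  simp only [PySem.Chars.islower, PySem.Chars.isupper, PySem.Chars.isdigit, PySem.Chars.isspace,
    Char.le_def, UInt32.le_iff_toNat_le, Char.toNat, Bool.and_eq_true, decide_eq_true_eq,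
    Bool.and_eq_false_iff, Bool.or_eq_false_iff, decide_eq_false_iff_not, not_le,
    e1, e2, e3, e4, e5, e6] at *
  omega

theorem pv_upper_only (c : Char) (h : PySem.Chars.isupper c = true) :
    PySem.Chars.isdigit c = false ∧ PySem.Chars.isspace c = false := by
  have e3 : 'A'.val.toNat = 65 := rfl
  have e4 : 'Z'.val.toNat = 90 := rfl
  have e5 : '0'.val.toNat = 48 := rfl
  have e6 : '9'.val.toNat = 57 := rfl
  simp only [PySem.Chars.isupper, PySem.Chars.isdigit, PySem.Chars.isspace,
    Char.le_def, UInt32.le_iff_toNat_le, Char.toNat, Bool.and_eq_true, decide_eq_true_eq,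
    Bool.and_eq_false_iff, Bool.or_eq_false_iff, decide_eq_false_iff_not, not_le,
    e3, e4, e5, e6] at *
  omega

theorem pv_digit_only (c : Char) (h : PySem.Chars.isdigit c = true) :
    PySem.Chars.isspace c = false := by
  have e5 : '0'.val.toNat = 48 := rfl
  have e6 : '9'.val.toNat = 57 := rfl
  simp only [PySem.Chars.isdigit, PySem.Chars.isspace,
    Char.le_def, UInt32.le_iff_toNat_le, Char.toNat, Bool.and_eq_true, decide_eq_true_eq,
    Bool.and_eq_false_iff, Bool.or_eq_false_iff, decide_eq_false_iff_not, not_le,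
    e5, e6] at *
  omega

-- inserting into the literal five-key flags dict (keys fixed, values symbolic)
theorem pv_ins_lower (b1 b2 b3 b4 b5 : Bool) :
    (PySem.Dict.mk [("lower", b1), ("upper", b2), ("digit", b3), ("space", b4), ("symbol", b5)]).insert "lower" true
    = PySem.Dict.mk [("lower", true), ("upper", b2), ("digit", b3), ("space", b4), ("symbol", b5)] := by
  simp [PySem.Dict.insert, PySem.Dict.contains]

theorem pv_ins_upper (b1 b2 b3 b4 b5 : Bool) :
    (PySem.Dict.mk [("lower", b1), ("upper", b2), ("digit", b3), ("space", b4), ("symbol", b5)]).insert "upper" true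
    = PySem.Dict.mk [("lower", b1), ("upper", true), ("digit", b3), ("space", b4), ("symbol", b5)] := by
  simp [PySem.Dict.insert, PySem.Dict.contains]

theorem pv_ins_digit (b1 b2 b3 b4 b5 : Bool) :
    (PySem.Dict.mk [("lower", b1), ("upper", b2), ("digit", b3), ("space", b4), ("symbol", b5)]).insert "digit" true
    = PySem.Dict.mk [("lower", b1), ("upper", b2), ("digit", true), ("space", b4), ("symbol", b5)] := by
  simp [PySem.Dict.insert, PySem.Dict.contains]

theorem pv_ins_space (b1 b2 b3 b4 b5 : Bool) :
    (PySem.Dict.mk [("lower", b1), ("upper", b2), ("digit", b3), ("space", b4), ("symbol", b5)]).insert "space" true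
    = PySem.Dict.mk [("lower", b1), ("upper", b2), ("digit", b3), ("space", true), ("symbol", b5)] := by
  simp [PySem.Dict.insert, PySem.Dict.contains]

theorem pv_ins_symbol (b1 b2 b3 b4 b5 : Bool) :
    (PySem.Dict.mk [("lower", b1), ("upper", b2), ("digit", b3), ("space", b4), ("symbol", b5)]).insert "symbol" true
    = PySem.Dict.mk [("lower", b1), ("upper", b2), ("digit", b3), ("space", b4), ("symbol", true)] := by
  simp [PySem.Dict.insert, PySem.Dict.contains]

-- loop invariant for A's flag loop: starting from any five flag values,
-- the loop or-s in 'some char of l is in the class' for each class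
theorem pv_foldA (l : List Char) (b1 b2 b3 b4 b5 : Bool) :
    l.foldl (fun fl c =>
      if PySem.Chars.islower c then fl.insert "lower" true
      else if PySem.Chars.isupper c then fl.insert "upper" true
      else if PySem.Chars.isdigit c then fl.insert "digit" true
      else if PySem.Chars.isspace c then fl.insert "space" true
      else fl.insert "symbol" true)
      (PySem.Dict.mk [("lower", b1), ("upper", b2), ("digit", b3), ("space", b4), ("symbol", b5)])
    = PySem.Dict.mk
      [("lower", b1 || l.any PySem.Chars.islower),
       ("upper", b2 || l.any PySem.Chars.isupper),
       ("digit", b3 || l.any PySem.Chars.isdigit),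
       ("space", b4 || l.any PySem.Chars.isspace),
       ("symbol", b5 || l.any (fun c =>
          !(PySem.Chars.islower c || PySem.Chars.isupper c ||
            PySem.Chars.isdigit c || PySem.Chars.isspace c)))] := by
  induction l generalizing b1 b2 b3 b4 b5 with
  | nil => simp
  | cons c t ih =>
    simp only [List.foldl_cons, List.any_cons]
    by_cases h1 : PySem.Chars.islower c = true
    · obtain ⟨u, d, s⟩ := pv_lower_only c h1
      simp [h1, u, d, s, pv_ins_lower, ih, Bool.or_assoc]
    · by_cases h2 : PySem.Chars.isupper c = true
      · obtain ⟨d, s⟩ := pv_upper_only c h2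
        simp [h1, h2, d, s, pv_ins_upper, ih, Bool.or_assoc]
      · by_cases h3 : PySem.Chars.isdigit c = true
        · have s := pv_digit_only c h3
          simp [h1, h2, h3, s, pv_ins_digit, ih, Bool.or_assoc]
        · by_cases h4 : PySem.Chars.isspace c = true
          · simp [h1, h2, h3, h4, pv_ins_space, ih, Bool.or_assoc]
          · simp [h1, h2, h3, h4, pv_ins_symbol, ih, Bool.or_assoc]

-- ===== VERDICT (by name: the statement is the Claim_ definition above) =====
theorem length_and_classes_spec : Claim_equal_length_and_classes := by
  intro password _
  unfold Spec_length_and_classes length_and_classes length_and_classes_alt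
  have h0 : (PySem.Dict.ofList
      [("lower", false), ("upper", false), ("digit", false), ("space", false)]
        : PySem.Dict String Bool).insert "symbol" false
      = PySem.Dict.mk [("lower", false), ("upper", false), ("digit", false),
                       ("space", false), ("symbol", false)] := by decide
  simp only [h0, pv_foldA, Bool.false_or]
  refine Prod.ext ?_ (Prod.ext ?_ ?_)
  · simp [PySem.Str.len_eq]
  · simp only [PySem.Dict.values]
    cases password.toList.any PySem.Chars.islower <;>
      cases password.toList.any PySem.Chars.isupper <;>
      cases password.toList.any PySem.Chars.isdigit <;>
      cases password.toList.any PySem.Chars.isspace <;>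
      cases password.toList.any (fun c =>
        !(PySem.Chars.islower c || PySem.Chars.isupper c ||
          PySem.Chars.isdigit c || PySem.Chars.isspace c)) <;> simp
  · simp
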